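-- pv_equiv track=rewrite | github.com/vempatinavya/owlcoder | owl2.py | repeatadd
-- ===== SOURCE A (Python) =====
-- def repeatadd(n):
--     s=0
--     while n>9:
--         d=n%10
--         n=n//10
--         s=d+n
--         n=s
--     if n<=9:
--         return n
--     return s
-- ===== SOURCE B (Python) =====
-- def repeatadd(n):
--     # closed-form digital root: for n > 9 the repeated digit-fold is 1 + (n-1) % 9
--     if n <= 9:
--         return n
--     return 1 + (n - 1) % 9
-- ===== Notes on version B (the rewrite author's own statement) =====
-- stated objective: faster
-- what changed: Replaced A's iterative last-digit-plus-rest reduction loop with the closed-form digital-root formula 1 + (n-1) % 9.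
import Mathlib
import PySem

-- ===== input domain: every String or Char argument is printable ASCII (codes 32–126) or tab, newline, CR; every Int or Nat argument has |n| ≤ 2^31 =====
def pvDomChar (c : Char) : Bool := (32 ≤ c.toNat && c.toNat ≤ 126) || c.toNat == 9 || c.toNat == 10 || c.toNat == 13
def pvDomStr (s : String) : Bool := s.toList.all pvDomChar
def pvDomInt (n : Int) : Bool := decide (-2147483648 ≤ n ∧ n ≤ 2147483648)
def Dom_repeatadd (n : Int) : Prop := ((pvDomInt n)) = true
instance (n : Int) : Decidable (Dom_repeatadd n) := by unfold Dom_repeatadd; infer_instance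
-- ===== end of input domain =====

-- B replaces A's iterative digit-fold loop with the closed-form digital root 1 + (n-1) % 9 (O(1) vs O(log n)).


-- ===== PORT A =====
-- the while loop: state (n, s); each iteration sets d = n % 10, n = n // 10, s = d + n, n = s
def repeataddLoop (n s : Int) : Int × Int :=
  if _h : n > 9 then
    let d := PySem.Int.mod n 10
    let n' := PySem.Int.floordiv n 10
    let s' := d + n'
    repeataddLoop s' s'
  else (n, s)
termination_by n.toNat
decreasing_by
  have h10 : PySem.Int.floordiv n 10 = n / 10 := PySem.Int.floordiv_eq_ediv_of_pos (by omega)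
  have hm : PySem.Int.mod n 10 = n % 10 := PySem.Int.mod_eq_emod_of_pos (by omega)
  simp only [h10, hm]
  omega

def repeatadd (n : Int) : Int :=
  let p := repeataddLoop n 0
  if p.1 ≤ 9 then p.1 else p.2

-- ===== PORT B =====
def repeatadd_alt (n : Int) : Int :=
  if n ≤ 9 then n else 1 + PySem.Int.mod (n - 1) 9

-- ===== PRECONDITION & SPEC =====
def Spec_repeatadd (n : Int) (out : Int) : Prop := out = repeatadd_alt n
instance (n : Int) (out : Int) : Decidable (Spec_repeatadd n out) := by unfold Spec_repeatadd; infer_instance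

-- ===== CLAIM (what is proved, stated in full; the proofs are below) =====
def Claim_equal_repeatadd : Prop := ∀ (n : Int), Dom_repeatadd n → Spec_repeatadd n (repeatadd n)

-- ===== LEMMAS AND PROOFS =====

-- the loop's result: first component is the digital root 1 + (n-1) % 9 whenever n > 9
theorem repeataddLoop_fst_aux (k : Nat) : ∀ (n s : Int), n.toNat ≤ k → n > 9 →
    (repeataddLoop n s).1 = 1 + (n - 1) % 9 := by
  induction k with
  | zero => intro n s hk h; omega
  | succ k ih =>
    intro n s hk h
    rw [repeataddLoop, dif_pos h]
    have h10 : PySem.Int.floordiv n 10 = n / 10 := PySem.Int.floordiv_eq_ediv_of_pos (by omega)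
    have hm : PySem.Int.mod n 10 = n % 10 := PySem.Int.mod_eq_emod_of_pos (by omega)
    simp only [h10, hm]
    set n' := n % 10 + n / 10 with hn'
    have hcong : (n' - 1) % 9 = (n - 1) % 9 := by omega
    by_cases h' : n' > 9
    · rw [ih n' n' (by omega) h', hcong]
    · rw [repeataddLoop, dif_neg h']
      simp only
      omega

theorem repeataddLoop_fst (n s : Int) (h : n > 9) :
    (repeataddLoop n s).1 = 1 + (n - 1) % 9 :=
  repeataddLoop_fst_aux n.toNat n s le_rfl h

-- ===== VERDICT (by name: the statement is the Claim_ definition above) =====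
theorem repeatadd_spec : Claim_equal_repeatadd := by
  intro n _
  unfold Spec_repeatadd repeatadd repeatadd_alt
  by_cases h : n ≤ 9
  · rw [repeataddLoop, dif_neg (by omega)]
    simp [h]
  · have hm9 : PySem.Int.mod (n - 1) 9 = (n - 1) % 9 := PySem.Int.mod_eq_emod_of_pos (by omega)
    have := repeataddLoop_fst n 0 (by omega)
    simp only [this, hm9, if_neg h]
    rw [if_pos (by omega)]
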